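-- pv_equiv track=rewrite | github.com/itsyuimorii/--TUTORIAL--Harvard_CS50_introduction_to_programming_with_python_solutions | week02/plates.py | is_valid_no_alphabet_after_first_number
-- ===== SOURCE A (Python) =====
-- def is_valid_no_alphabet_after_first_number(s):
--     first_num = len(s) - 1
--     for i, character in enumerate(s):
--         if character.isnumeric():
--             first_num = i
--             break
--     for character in s[first_num + 1:]:
--         if character.isalpha():
--             return False
--     return True
-- ===== SOURCE B (Python) =====
-- def is_valid_no_alphabet_after_first_number(s):
--     seen_number = False
--     for character in s:
--         if seen_number and character.isalpha():
--             return False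
--         if character.isnumeric():
--             seen_number = True
--     return True
-- ===== Notes on version B (the rewrite author's own statement) =====
-- stated objective: simpler
-- what changed: Replaced A's two-phase structure (find the first digit index with enumerate/break, then slice the tail and scan it for letters) by a single pass carrying a seen_number flag, eliminating the slice and the index bookkeeping.
import Mathlib
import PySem

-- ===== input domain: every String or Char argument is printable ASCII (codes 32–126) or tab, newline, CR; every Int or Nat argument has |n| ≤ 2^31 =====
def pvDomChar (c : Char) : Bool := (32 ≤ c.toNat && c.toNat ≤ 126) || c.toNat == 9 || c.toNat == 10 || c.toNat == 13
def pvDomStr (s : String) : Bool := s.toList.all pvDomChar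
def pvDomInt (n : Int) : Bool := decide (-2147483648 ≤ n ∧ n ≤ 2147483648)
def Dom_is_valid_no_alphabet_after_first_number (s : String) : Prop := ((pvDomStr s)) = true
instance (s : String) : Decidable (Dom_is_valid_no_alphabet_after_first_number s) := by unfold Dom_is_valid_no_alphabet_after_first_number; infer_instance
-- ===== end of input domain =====

-- B replaces A's find-first-digit-then-slice-and-scan structure by a single pass with a seen_number flag (objective: simpler).


-- ===== PORT A =====
-- first loop of A: enumerate with break — returns the index of the first numeric char, if any.
-- (str.isnumeric coincides with str.isdigit on the printable-ASCII domain: only '0'-'9' qualify.)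
def pvA_firstNum (l : List Char) (i : Nat) : Option Nat :=
  match l with
  | [] => none
  | c :: r => if PySem.Chars.isdigit c then some i else pvA_firstNum r (i + 1)

-- second loop of A: scan the sliced tail, return False on the first alphabetic char.
def pvA_scan (l : List Char) : Bool :=
  match l with
  | [] => true
  | c :: r => if PySem.Chars.isalpha c then false else pvA_scan r

def is_valid_no_alphabet_after_first_number (s : String) : Bool :=
  let l := s.toList
  let first_num : Int :=
    match pvA_firstNum l 0 with
    | some i => (i : Int)
    | none => (l.length : Int) - 1
  pvA_scan (PySem.List.slice l (some (first_num + 1)) none)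

-- ===== PORT B =====
def pvB_loop (l : List Char) (seen : Bool) : Bool :=
  match l with
  | [] => true
  | c :: r =>
    if seen && PySem.Chars.isalpha c then false
    else pvB_loop r (if PySem.Chars.isdigit c then true else seen)

def is_valid_no_alphabet_after_first_number_alt (s : String) : Bool :=
  pvB_loop s.toList false

-- ===== PRECONDITION & SPEC =====
def Spec_is_valid_no_alphabet_after_first_number (s : String) (out : Bool) : Prop := out = is_valid_no_alphabet_after_first_number_alt s
instance (s : String) (out : Bool) : Decidable (Spec_is_valid_no_alphabet_after_first_number s out) := by unfold Spec_is_valid_no_alphabet_after_first_number; infer_instance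

-- ===== CLAIM (what is proved, stated in full; the proofs are below) =====
def Claim_equal_is_valid_no_alphabet_after_first_number : Prop := ∀ (s : String), Dom_is_valid_no_alphabet_after_first_number s → Spec_is_valid_no_alphabet_after_first_number s (is_valid_no_alphabet_after_first_number s)

-- ===== LEMMAS AND PROOFS =====

-- once the flag is set, B's loop is exactly A's tail scan
theorem pvB_loop_true (l : List Char) : pvB_loop l true = pvA_scan l := by
  induction l with
  | nil => rfl
  | cons c r ih =>
    simp only [pvB_loop, pvA_scan, Bool.true_and]
    by_cases h : PySem.Chars.isalpha c <;> simp [h, ih]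

-- if no char of l is a digit, B's loop (flag off) returns true
theorem pvB_loop_no_digit (l : List Char) (h : pvA_firstNum l 0 = none) :
    pvB_loop l false = true := by
  induction l with
  | nil => rfl
  | cons c r ih =>
    simp only [pvA_firstNum] at h
    by_cases hd : PySem.Chars.isdigit c
    · simp [hd] at h
    · simp only [pvB_loop, Bool.false_and, if_neg hd]
      apply ih
      -- pvA_firstNum is none independently of the starting index
      have shift : ∀ (m : List Char) (i j : Nat),
          pvA_firstNum m i = none → pvA_firstNum m j = none := by
        intro m
        induction m with
        | nil => intro _ _ _; rfl
        | cons d t iht =>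
          intro i j hm
          simp only [pvA_firstNum] at hm ⊢
          by_cases hdd : PySem.Chars.isdigit d
          · simp [hdd] at hm
          · simp only [if_neg hdd] at hm ⊢; exact iht _ _ hm
      simp [hd] at h
      exact shift r _ _ h

-- the first digit is at offset k from the start index, and the scan of the chars after it decides B
theorem pvB_loop_digit (l : List Char) (i k : Nat)
    (h : pvA_firstNum l i = some (i + k)) :
    pvB_loop l false = pvA_scan (l.drop (k + 1)) := by
  induction l generalizing i k with
  | nil => simp [pvA_firstNum] at h
  | cons c r ih =>
    simp only [pvA_firstNum] at h
    by_cases hd : PySem.Chars.isdigit c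
    · simp only [if_pos hd, Option.some.injEq] at h
      have hk : k = 0 := by omega
      subst hk
      -- the flag is still off at the digit itself, so B does not test it for isalpha
      simp [pvB_loop, hd, pvB_loop_true]
    · simp only [if_neg hd] at h
      simp only [pvB_loop, Bool.false_and, if_neg hd]
      have hk : 1 ≤ k := by
        -- first index returned is ≥ i + 1
        have ge : ∀ (m : List Char) (a b : Nat), pvA_firstNum m a = some b → a ≤ b := by
          intro m
          induction m with
          | nil => intro a b hm; simp [pvA_firstNum] at hm
          | cons d t iht =>
            intro a b hm
            simp only [pvA_firstNum] at hm
            by_cases hdd : PySem.Chars.isdigit d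
            · simp [hdd] at hm; omega
            · simp only [if_neg hdd] at hm
              have := iht _ _ hm; omega
        have := ge r (i + 1) (i + k) h
        omega
      have h' : pvA_firstNum r (i + 1) = some ((i + 1) + (k - 1)) := by
        rw [h]; congr 1; omega
      have hdrop : List.drop (k - 1 + 1) r = List.drop (k + 1) (c :: r) := by
        rw [List.drop_succ_cons]
        congr 1
        omega
      rw [ih (i + 1) (k - 1) h', hdrop]
      simp

theorem is_valid_no_alphabet_after_first_number_spec : Claim_equal_is_valid_no_alphabet_after_first_number := by
  intro s _
  unfold Spec_is_valid_no_alphabet_after_first_number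
  unfold is_valid_no_alphabet_after_first_number is_valid_no_alphabet_after_first_number_alt
  cases h : pvA_firstNum s.toList 0 with
  | none =>
    simp only [h]
    rw [pvB_loop_no_digit s.toList h]
    -- no digit: first_num = len-1, the slice starts at len (or 0 for the empty string) — scan is of a letter-free tail? no: slice is whole handling below
    cases hl : s.toList with
    | nil => simp [PySem.List.slice, pvA_scan]
    | cons c r =>
      have : ((List.length (c :: r) : Int) - 1 + 1) = ((List.length (c :: r) : Nat) : Int) := by omega
      rw [hl] at *
      rw [this, PySem.List.slice_from_natCast]
      simp [pvA_scan]
  | some j =>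
    simp only [h]
    have hj : ((j : Int) + 1) = (((j + 1 : Nat)) : Int) := by push_cast; ring
    rw [hj, PySem.List.slice_from_natCast]
    have : pvA_firstNum s.toList 0 = some (0 + j) := by simpa using h
    exact (pvB_loop_digit s.toList 0 j this).symm
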